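-- pv_equiv track=rewrite | github.com/roderickmackenzie/gpvdm | gpvdm_gui/gui/inp_util.py | inp_file_to_list
-- ===== SOURCE A (Python) =====
-- def inp_file_to_list(lines):
-- 	sub_items=[]
-- 	items=[]
-- 	for l in lines:
-- 		if l.startswith("#") and len(sub_items)!=0:
-- 			items.append(sub_items)
-- 			sub_items=[]
--
-- 		if l=="#end" or l=="#ver":
-- 			break
--
-- 		sub_items.append(l)
--
-- 	return items
-- ===== SOURCE B (Python) =====
-- def _chunks(b):
--     if not b:
--         return []
--     j = 1
--     while j < len(b) and not b[j].startswith("#"):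
--         j += 1
--     return [b[:j]] + _chunks(b[j:])
--
-- def inp_file_to_list(lines):
--     terminated = False
--     body = []
--     for l in lines:
--         if l == "#end" or l == "#ver":
--             terminated = True
--             break
--         body.append(l)
--     if not body:
--         return []
--     groups = _chunks(body)
--     if not terminated:
--         groups.pop()
--     return groups
-- ===== Notes on version B (the rewrite author's own statement) =====
-- stated objective: alternative
-- what changed: Replaces A's single accumulate-and-flush loop with three separate phases: a pre-pass that cuts the body at the first '#end'/'#ver' terminator, a top-down recursive chunker that slices each group as header-plus-following-non-# lines, and a final pop of the open trailing group when no terminator was seen.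
import Mathlib
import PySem

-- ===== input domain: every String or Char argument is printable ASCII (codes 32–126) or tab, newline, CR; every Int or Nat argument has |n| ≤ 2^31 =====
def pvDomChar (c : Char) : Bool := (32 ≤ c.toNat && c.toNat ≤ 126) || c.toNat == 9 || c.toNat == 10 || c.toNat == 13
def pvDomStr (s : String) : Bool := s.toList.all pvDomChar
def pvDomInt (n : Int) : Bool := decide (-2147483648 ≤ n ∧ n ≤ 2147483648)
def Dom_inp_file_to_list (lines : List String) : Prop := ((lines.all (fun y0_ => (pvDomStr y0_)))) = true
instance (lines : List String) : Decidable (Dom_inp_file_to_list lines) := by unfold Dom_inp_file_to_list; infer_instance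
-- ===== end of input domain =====

-- B replaces A's accumulate-and-flush loop by a terminator pre-pass, a top-down chunker, and a
-- final pop of the open trailing group; same values, same cost (objective: alternative).

-- l.startswith("#")  (shared primitive of both Pythons)
def pvIsHash (l : String) : Bool := PySem.Str.startswith l "#"

-- ===== PORT A =====
-- loop of A: state (sub_items, items); flush on '#' line with nonempty sub, break on '#end'/'#ver'
def goA : List String → List String → List (List String) → List (List String)
  | [], _sub, items => items
  | l :: rest, sub, items =>
    let p :=
      if pvIsHash l = true ∧ sub ≠ [] then (items ++ [sub], ([] : List String))
      else (items, sub)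
    if l = "#end" ∨ l = "#ver" then p.1
    else goA rest (p.2 ++ [l]) p.1

def inp_file_to_list (lines : List String) : List (List String) := goA lines [] []

-- ===== PORT B =====
-- pre-pass of Source B: (terminated?, body = lines before the first '#end'/'#ver')
def scanTermB : List String → Bool × List String
  | [] => (false, [])
  | l :: rest =>
    if l = "#end" ∨ l = "#ver" then (true, [])
    else
      let p := scanTermB rest
      (p.1, l :: p.2)

-- _chunks of Source B: the inner while loop scanning to the next '#' line is a takeWhile/dropWhile split
def chunksB : List String → List (List String)
  | [] => []
  | h :: r =>
    (h :: r.takeWhile (fun l => !(pvIsHash l))) ::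
      chunksB (r.dropWhile (fun l => !(pvIsHash l)))
termination_by b => b.length
decreasing_by
  exact Nat.lt_succ_of_le (List.length_dropWhile_le _ _)

def inp_file_to_list_alt (lines : List String) : List (List String) :=
  let s := scanTermB lines
  if s.2 = [] then []
  else
    let groups := chunksB s.2
    if s.1 = true then groups else groups.dropLast

-- ===== PRECONDITION & SPEC =====
def Spec_inp_file_to_list (lines : List String) (out : List (List String)) : Prop := out = inp_file_to_list_alt lines
instance (lines : List String) (out : List (List String)) : Decidable (Spec_inp_file_to_list lines out) := by unfold Spec_inp_file_to_list; infer_instance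

-- ===== CLAIM (what is proved, stated in full; the proofs are below) =====
def Claim_equal_inp_file_to_list : Prop := ∀ (lines : List String), Dom_inp_file_to_list lines → Spec_inp_file_to_list lines (inp_file_to_list lines)

-- ===== LEMMAS AND PROOFS =====

-- grouping with an open accumulator `sub`, closing it at the end (bridge between the two ports)
def chunksW : List String → List String → List (List String)
  | sub, [] => [sub]
  | sub, l :: r =>
    if pvIsHash l = true ∧ sub ≠ [] then sub :: chunksW [l] r
    else chunksW (sub ++ [l]) r

lemma chunksB_cons (h : String) (r : List String) :
    chunksB (h :: r) = (h :: r.takeWhile (fun l => !(pvIsHash l))) ::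
      chunksB (r.dropWhile (fun l => !(pvIsHash l))) := by
  rw [chunksB]

lemma chunksW_ne_nil (b : List String) : ∀ (sub : List String), chunksW sub b ≠ [] := by
  induction b with
  | nil => intro sub; simp [chunksW]
  | cons l r ih =>
    intro sub
    simp only [chunksW]
    split
    · simp
    · exact ih _

lemma goA_eq (lines : List String) : ∀ (sub : List String) (items : List (List String)),
    goA lines sub items = items ++
      (if (scanTermB lines).1 = true then
        (if (scanTermB lines).2 = [] ∧ sub = [] then [] else chunksW sub (scanTermB lines).2)
      else (chunksW sub (scanTermB lines).2).dropLast) := by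
  induction lines with
  | nil =>
    intro sub items
    simp [goA, scanTermB, chunksW]
  | cons l rest ih =>
    intro sub items
    by_cases hterm : l = "#end" ∨ l = "#ver"
    · have hsw : pvIsHash l = true := by
        rcases hterm with h | h <;> subst h <;> decide
      simp only [goA, scanTermB, if_pos hterm]
      by_cases hsub : sub = []
      · subst hsub; simp
      · simp [hsw, hsub, chunksW]
    · simp only [goA, scanTermB, if_neg hterm]
      by_cases hflush : pvIsHash l = true ∧ sub ≠ []
      · have hcw : chunksW sub (l :: (scanTermB rest).2) = sub :: chunksW [l] (scanTermB rest).2 := by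
          simp only [chunksW]; rw [if_pos hflush]
        simp only [if_pos hflush, List.nil_append]
        rw [ih [l] (items ++ [sub]), hcw]
        by_cases ht : (scanTermB rest).1 = true
        · simp [ht, List.append_assoc]
        · simp only [Bool.not_eq_true] at ht
          simp [ht, List.dropLast_cons_of_ne_nil (chunksW_ne_nil (scanTermB rest).2 [l]),
            List.append_assoc]
      · have hcw : chunksW sub (l :: (scanTermB rest).2) = chunksW (sub ++ [l]) (scanTermB rest).2 := by
          simp only [chunksW]; rw [if_neg hflush]
        simp only [if_neg hflush]
        rw [ih (sub ++ [l]) items, hcw]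
        have hne : sub ++ [l] ≠ [] := by simp
        by_cases ht : (scanTermB rest).1 = true
        · simp [ht, hne]
        · simp only [Bool.not_eq_true] at ht
          simp [ht]

lemma chunksW_eq_chunksB (b : List String) : ∀ (sub : List String), sub ≠ [] →
    chunksW sub b =
      (sub ++ b.takeWhile (fun l => !(pvIsHash l))) ::
        chunksB (b.dropWhile (fun l => !(pvIsHash l))) := by
  induction b with
  | nil => intro sub hsub; simp [chunksW, chunksB]
  | cons l r ih =>
    intro sub hsub
    rw [List.takeWhile_cons, List.dropWhile_cons]
    cases hsw : pvIsHash l with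
    | true =>
      have h1 : chunksW sub (l :: r) = sub :: chunksW [l] r := by
        simp only [chunksW]; rw [if_pos ⟨hsw, hsub⟩]
      have hcond : ¬((!true) = true) := by decide
      rw [h1, ih [l] (by simp), if_neg hcond, if_neg hcond, chunksB_cons]
      simp
    | false =>
      have h1 : chunksW sub (l :: r) = chunksW (sub ++ [l]) r := by
        simp only [chunksW]
        rw [if_neg (fun hc => by rw [hsw] at hc; exact Bool.false_ne_true hc.1)]
      have hcond : (!false) = true := by decide
      rw [h1, ih (sub ++ [l]) (by simp), if_pos hcond, if_pos hcond]
      simp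

lemma chunksW_nil_eq (b : List String) (hb : b ≠ []) : chunksW [] b = chunksB b := by
  cases b with
  | nil => exact absurd rfl hb
  | cons h r =>
    have h0 : chunksW ([] : List String) (h :: r) = chunksW [h] r := by
      simp only [chunksW]
      rw [if_neg (fun hc => hc.2 rfl)]
      rfl
    rw [h0, chunksW_eq_chunksB r [h] (by simp), chunksB_cons]
    simp

-- ===== VERDICT (by name: the statement is the Claim_ definition above) =====
theorem inp_file_to_list_spec : Claim_equal_inp_file_to_list := by
  intro lines _hdom
  unfold Spec_inp_file_to_list inp_file_to_list inp_file_to_list_alt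
  rw [goA_eq lines [] []]
  by_cases hb : (scanTermB lines).2 = []
  · by_cases ht : (scanTermB lines).1 = true
    · simp [hb, ht]
    · simp only [Bool.not_eq_true] at ht
      simp [hb, ht, chunksW]
  · rw [chunksW_nil_eq _ hb]
    by_cases ht : (scanTermB lines).1 = true
    · simp [hb, ht]
    · simp only [Bool.not_eq_true] at ht
      simp [hb, ht]
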